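-- pv_equiv track=rewrite | github.com/Jebolwski/hackerrank_problem_solving_problems | python_problems_16.py | isalnum
-- ===== SOURCE A (Python) =====
-- def isalnum(s):
--     count_number=0
--     count_letter=0
--     nums=['0','1','2','3','4','5','6','7','8','9']
--     for i in range(len(s)):
--         if s[i] in nums:
--             count_number=count_letter+1
--         else:
--             count_letter=count_letter+1
--     if count_number>0 and count_letter>0:
--         return "True"
--     return "False"
-- ===== SOURCE B (Python) =====
-- def isalnum(s):
--     cs = set(s)
--     d = set('0123456789')
--     return "True" if (cs & d) and (cs - d) else "False"
-- ===== Notes on version B (the rewrite author's own statement) =====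
-- stated objective: simpler
-- what changed: Replaces the index loop with two integer counters by building the set of characters once and testing set intersection/difference against the digit set for non-emptiness.
import Mathlib
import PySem

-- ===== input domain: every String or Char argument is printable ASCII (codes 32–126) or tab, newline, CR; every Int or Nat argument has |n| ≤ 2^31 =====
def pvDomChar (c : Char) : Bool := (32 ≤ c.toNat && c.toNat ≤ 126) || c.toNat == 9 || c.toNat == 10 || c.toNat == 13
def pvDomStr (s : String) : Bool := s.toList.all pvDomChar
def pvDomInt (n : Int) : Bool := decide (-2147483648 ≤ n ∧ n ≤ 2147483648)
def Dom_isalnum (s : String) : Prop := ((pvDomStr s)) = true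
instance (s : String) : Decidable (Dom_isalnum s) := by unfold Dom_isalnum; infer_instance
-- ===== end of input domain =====

-- B replaces A's indexed counting loop with set intersection/difference against the digit set (simpler; return value equivalence).

-- ===== PORT A =====
-- transliteration of A: two counters over 'for i in range(len(s))' (the default ' ' of pyGetD is never used: i is in range)
def isalnum (s : String) : String :=
  let nums : List Char := ['0','1','2','3','4','5','6','7','8','9']
  let st := (PySem.List.pyRange 0 (PySem.Str.len s) 1).foldl
    (fun (acc : Int × Int) i =>
      if PySem.List.pyGetD s.toList i ' ' ∈ nums then (acc.2 + 1, acc.2)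
      else (acc.1, acc.2 + 1))
    (0, 0)
  if 0 < st.1 ∧ 0 < st.2 then "True" else "False"

-- ===== PORT B =====
def isalnum_alt (s : String) : String :=
  let cs := PySem.Set.ofList s.toList
  let d := PySem.Set.ofList "0123456789".toList
  if PySem.Set.inter cs d ≠ [] ∧ PySem.Set.diff cs d ≠ [] then "True" else "False"

-- ===== PRECONDITION & SPEC =====
def Spec_isalnum (s : String) (out : String) : Prop := out = isalnum_alt s
instance (s : String) (out : String) : Decidable (Spec_isalnum s out) := by unfold Spec_isalnum; infer_instance

-- ===== CLAIM (what is proved, stated in full; the proofs are below) =====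
def Claim_equal_isalnum : Prop := ∀ (s : String), Dom_isalnum s → Spec_isalnum s (isalnum s)

-- ===== LEMMAS AND PROOFS =====

def pvDigits : List Char := ['0','1','2','3','4','5','6','7','8','9']

-- loop invariant for A's fold: component positivity characterises "saw a digit" / "saw a non-digit"
theorem pvFoldInv (l : List Char) : ∀ (cn cl : Int), 0 ≤ cn → 0 ≤ cl →
    (0 ≤ (l.foldl (fun (acc : Int × Int) c =>
        if c ∈ pvDigits then (acc.2 + 1, acc.2) else (acc.1, acc.2 + 1)) (cn, cl)).1 ∧
     0 ≤ (l.foldl (fun (acc : Int × Int) c =>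
        if c ∈ pvDigits then (acc.2 + 1, acc.2) else (acc.1, acc.2 + 1)) (cn, cl)).2) ∧
    ((0 < (l.foldl (fun (acc : Int × Int) c =>
        if c ∈ pvDigits then (acc.2 + 1, acc.2) else (acc.1, acc.2 + 1)) (cn, cl)).1 ↔
      0 < cn ∨ ∃ c ∈ l, c ∈ pvDigits) ∧
     (0 < (l.foldl (fun (acc : Int × Int) c =>
        if c ∈ pvDigits then (acc.2 + 1, acc.2) else (acc.1, acc.2 + 1)) (cn, cl)).2 ↔
      0 < cl ∨ ∃ c ∈ l, c ∉ pvDigits)) := by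
  induction l with
  | nil => intro cn cl h1 h2; simp; omega
  | cons c l ih =>
    intro cn cl h1 h2
    by_cases hc : c ∈ pvDigits
    · have := ih (cl + 1) cl (by omega) h2
      simp only [List.foldl_cons, if_pos hc]
      refine ⟨this.1, ?_, ?_⟩
      · rw [this.2.1]; simp [hc]; omega
      · rw [this.2.2]; simp [hc]
    · have := ih cn (cl + 1) h1 (by omega)
      simp only [List.foldl_cons, if_neg hc]
      refine ⟨this.1, ?_, ?_⟩
      · rw [this.2.1]; simp [hc]
      · rw [this.2.2]; simp [hc]; omega

theorem pvNeNil {α : Type} (l : List α) : l ≠ [] ↔ ∃ x, x ∈ l := by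
  cases l <;> simp

-- ===== VERDICT (by name: the statement is the Claim_ definition above) =====
theorem isalnum_spec : Claim_equal_isalnum := by
  intro s _
  unfold Spec_isalnum isalnum isalnum_alt
  simp only
  simp only [show (['0','1','2','3','4','5','6','7','8','9'] : List Char) = pvDigits from rfl]
  rw [show PySem.Str.len s = (s.toList.length : Int) by simp [PySem.Str.len],
      PySem.List.foldl_pyRange_zero_pyGetD' s.toList ' '
        (fun (acc : Int × Int) c =>
          if c ∈ pvDigits then (acc.2 + 1, acc.2) else (acc.1, acc.2 + 1)) (0, 0)]
  have h := pvFoldInv s.toList 0 0 (by omega) (by omega)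
  have hA : (0 < (s.toList.foldl (fun (acc : Int × Int) c =>
      if c ∈ pvDigits then (acc.2 + 1, acc.2) else (acc.1, acc.2 + 1)) (0, 0)).1 ∧
      0 < (s.toList.foldl (fun (acc : Int × Int) c =>
      if c ∈ pvDigits then (acc.2 + 1, acc.2) else (acc.1, acc.2 + 1)) (0, 0)).2) ↔
      ((∃ c ∈ s.toList, c ∈ pvDigits) ∧ (∃ c ∈ s.toList, c ∉ pvDigits)) := by
    rw [h.2.1, h.2.2]; simp
  have hB : (PySem.Set.inter (PySem.Set.ofList s.toList) (PySem.Set.ofList "0123456789".toList) ≠ [] ∧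
      PySem.Set.diff (PySem.Set.ofList s.toList) (PySem.Set.ofList "0123456789".toList) ≠ []) ↔
      ((∃ c ∈ s.toList, c ∈ pvDigits) ∧ (∃ c ∈ s.toList, c ∉ pvDigits)) := by
    have hds : "0123456789".toList = pvDigits := by decide
    rw [pvNeNil, pvNeNil]
    constructor
    · rintro ⟨⟨x, hx⟩, ⟨y, hy⟩⟩
      rw [PySem.Set.mem_inter] at hx
      rw [PySem.Set.mem_diff] at hy
      simp only [PySem.Set.mem_ofList, hds] at hx hy
      exact ⟨⟨x, hx.1, hx.2⟩, ⟨y, hy.1, hy.2⟩⟩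
    · rintro ⟨⟨x, hx, hxd⟩, ⟨y, hy, hyd⟩⟩
      refine ⟨⟨x, ?_⟩, ⟨y, ?_⟩⟩
      · rw [PySem.Set.mem_inter]; simp only [PySem.Set.mem_ofList, hds]
        exact ⟨hx, hxd⟩
      · rw [PySem.Set.mem_diff]; simp only [PySem.Set.mem_ofList, hds]
        exact ⟨hy, hyd⟩
  by_cases hcond : (∃ c ∈ s.toList, c ∈ pvDigits) ∧ (∃ c ∈ s.toList, c ∉ pvDigits)
  · rw [if_pos (hA.mpr hcond), if_pos (hB.mpr hcond)]
  · rw [if_neg (fun h' => hcond (hA.mp h')), if_neg (fun h' => hcond (hB.mp h'))]
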